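-- pv_equiv track=rewrite | github.com/DKU-STUDY/Algorithm | programmers/난이도별/level03.풍선_터트리기/6047198844.py | solution
-- ===== SOURCE A (Python) =====
-- import heapq
--
-- def solution(a):
--     answer_balloon = set()
--
--     left_heap = []
--     right_heap = []
--
--     # left_heap / right_heap은 왼쪽 / 오른쪽에서 최후까지 남아있는 풍선을 뜻한다.
--     # 풍선은 왼쪽이나 오른쪽의 최후의 풍선중 하나라도 자신보다 크다면 무조건 마지막까지 살아남을수있다.
--     # EX) 왼쪽 최후가 크고 오른쪽 최후가 작은 경우. 왼쪽 최후 터트리고 오른쪽 최후는 찬스 이용 오른쪽을 터트릴수있음.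
--     # 답을 answer_balloon에 넣는다.
--     for idx in range(len(a)):
--         left_balloon = a[idx]
--         heapq.heappush(left_heap, left_balloon)
--         if left_heap[0] >= left_balloon:
--             answer_balloon.add(left_balloon)
--
--         right_balloon = a[-1 - idx]
--         heapq.heappush(right_heap, right_balloon)
--         if right_heap[0] >= right_balloon:
--             answer_balloon.add(right_balloon)
--
--     return len(answer_balloon)
-- ===== SOURCE B (Python) =====
-- def solution(a):
--     # Per-distinct-value characterisation: a balloon value survives iff it is
--     # <= everything before its first occurrence (i.e. it equals the prefix
--     # minimum there) or <= everything after its last occurrence (it equals the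
--     # suffix minimum there).  Precompute prefix/suffix minimum arrays and the
--     # first/last occurrence of each distinct value, then count over the
--     # distinct values.  No heaps and no set of survivors.
--     pm = []                      # pm[i] = min(a[:i+1])
--     for x in a:
--         pm.append(x if not pm else min(pm[-1], x))
--     sm_rev = []                  # suffix minima, collected from the right
--     m = None
--     for x in reversed(a):
--         m = x if m is None or x < m else m
--         sm_rev.append(m)
--     sm = sm_rev[::-1]            # sm[i] = min(a[i:])
--     first = {}
--     last = {}
--     for i, x in enumerate(a):
--         if x not in first:
--             first[x] = i
--         last[x] = i
--     return sum(1 for x, f in first.items() if x == pm[f] or x == sm[last[x]])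
-- ===== Notes on version B (the rewrite author's own statement) =====
-- stated objective: alternative
-- what changed: Replaces A's two heaps and survivor set by precomputed prefix/suffix-minimum arrays plus first/last-occurrence dicts, counting the distinct values that equal the prefix minimum at their first occurrence or the suffix minimum at their last occurrence; it trades the heap machinery for array/dict precomputation of the same linear number of passes.
import Mathlib
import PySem

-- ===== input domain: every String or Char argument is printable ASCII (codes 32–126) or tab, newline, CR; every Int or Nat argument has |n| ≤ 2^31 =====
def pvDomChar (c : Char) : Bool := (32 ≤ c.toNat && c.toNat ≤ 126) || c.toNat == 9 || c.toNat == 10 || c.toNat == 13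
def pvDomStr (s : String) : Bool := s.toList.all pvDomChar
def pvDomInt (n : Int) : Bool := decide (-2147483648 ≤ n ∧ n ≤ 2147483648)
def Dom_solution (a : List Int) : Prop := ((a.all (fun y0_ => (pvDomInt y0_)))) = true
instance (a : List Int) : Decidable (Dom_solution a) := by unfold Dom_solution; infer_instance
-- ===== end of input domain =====

-- B drops A's heaps and survivor set entirely: it precomputes prefix/suffix-minimum
-- arrays and the first/last occurrence of each distinct value, then counts the distinct
-- values that equal the prefix minimum at their first occurrence or the suffix minimum
-- at their last occurrence.

-- ===== PORT A =====
-- heapq is modelled by its specification: heappush adds the element to the heap's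
-- element bag, heap[0] is the minimum element (the only read A performs).
def pvHeapPush (h : List Int) (x : Int) : List Int := h ++ [x]
def pvHeapPeek (h : List Int) : Int :=
  match h with
  | [] => 0   -- heap[0] on an empty heap (never reached: A peeks only right after a push)
  | y :: t => t.foldl min y

def pvAStep (a : List Int) (st : PySem.Set Int × List Int × List Int) (idx : Int) :
    PySem.Set Int × List Int × List Int :=
  let left_balloon := PySem.List.pyGetD a idx 0
  let left_heap := pvHeapPush st.2.1 left_balloon
  let answer := if pvHeapPeek left_heap ≥ left_balloon then PySem.Set.add st.1 left_balloon else st.1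
  let right_balloon := PySem.List.pyGetD a (-1 - idx) 0
  let right_heap := pvHeapPush st.2.2 right_balloon
  let answer := if pvHeapPeek right_heap ≥ right_balloon then PySem.Set.add answer right_balloon else answer
  (answer, left_heap, right_heap)

def solution (a : List Int) : Int :=
  PySem.Set.len
    (((PySem.List.pyRange 0 (PySem.List.len a) 1).foldl (pvAStep a)
      (PySem.Set.empty, ([], [])))).1

-- ===== PORT B =====
-- pm.append(x if not pm else min(pm[-1], x))
def pvPmStep (pm : List Int) (x : Int) : List Int :=
  pm ++ [if pm.isEmpty then x else min (PySem.List.pyGetD pm (-1) 0) x]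

-- m = x if m is None or x < m else m; sm_rev.append(m)
def pvSmStep (st : Option Int × List Int) (x : Int) : Option Int × List Int :=
  let m := match st.1 with
    | none => x
    | some m0 => if x < m0 then x else m0
  (some m, st.2 ++ [m])

-- if x not in first: first[x] = i
def pvStep1 (d : PySem.Dict Int Int) (p : Int × Int) : PySem.Dict Int Int :=
  if d.contains p.2 then d else d.insert p.2 p.1
-- last[x] = i
def pvStep2 (d : PySem.Dict Int Int) (p : Int × Int) : PySem.Dict Int Int :=
  d.insert p.2 p.1
def pvFLStep (st : PySem.Dict Int Int × PySem.Dict Int Int) (p : Int × Int) :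
    PySem.Dict Int Int × PySem.Dict Int Int :=
  (pvStep1 st.1 p, pvStep2 st.2 p)

def solution_alt (a : List Int) : Int :=
  let pm := a.foldl pvPmStep []
  let sm := ((a.reverse.foldl pvSmStep (none, [])).2).reverse
  let fl := (PySem.List.enumerate a).foldl pvFLStep (PySem.Dict.empty, PySem.Dict.empty)
  (PySem.Dict.items fl.1).foldl (fun acc vf =>
    if vf.1 = PySem.List.pyGetD pm vf.2 0 ∨
       vf.1 = PySem.List.pyGetD sm (PySem.Dict.getD fl.2 vf.1 0) 0
    then acc + 1 else acc) 0

-- ===== PRECONDITION & SPEC =====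
def Spec_solution (a : List Int) (out : Int) : Prop := out = solution_alt a
instance (a : List Int) (out : Int) : Decidable (Spec_solution a out) := by unfold Spec_solution; infer_instance

-- ===== CLAIM (what is proved, stated in full; the proofs are below) =====
def Claim_equal_solution : Prop := ∀ (a : List Int), Dom_solution a → Spec_solution a (solution a)

-- ===== LEMMAS AND PROOFS =====

-- x ≤ every element of an optional running minimum
def pvLeOpt (x : Int) (m : Option Int) : Bool :=
  match m with
  | none => true
  | some z => decide (x ≤ z)

-- running minimum of l starting from m
def pvMinOpt (m : Option Int) : List Int → Option Int
  | [] => m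
  | y :: t => pvMinOpt (match m with | none => some y | some z => some (min z y)) t

-- the sublist of running-minimum ("prefix-minimum") values
def pvPmins (m : Option Int) : List Int → List Int
  | [] => []
  | y :: t => if pvLeOpt y m then y :: pvPmins (some y) t else pvPmins m t

-- the list of running minima (pm / sm_rev arrays of B)
def pvRM (m : Option Int) : List Int → List Int
  | [] => []
  | x :: t =>
      (match m with | none => x | some z => min z x) ::
        pvRM (some (match m with | none => x | some z => min z x)) t

-- index of the first occurrence
def pvFirstN (v : Int) : List Int → Option Nat
  | [] => none
  | x :: t => if x = v then some 0 else (pvFirstN v t).map (· + 1)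

theorem pvMinOpt_some (z : Int) (t : List Int) : pvMinOpt (some z) t = some (t.foldl min z) := by
  induction t generalizing z with
  | nil => rfl
  | cons y t ih => simp [pvMinOpt, List.foldl, ih]

theorem pvMinOpt_eq_some_iff (l : List Int) (v : Int) :
    pvMinOpt none l = some v ↔ v ∈ l ∧ ∀ y ∈ l, v ≤ y := by
  cases l with
  | nil => simp [pvMinOpt]
  | cons x t =>
    have h1 : pvMinOpt none (x :: t) = (x :: t).min? := by
      simp [pvMinOpt, pvMinOpt_some, List.min?]
    rw [h1, List.min?_eq_some_iff]

theorem pvMinOpt_none_eq_none (l : List Int) : pvMinOpt none l = none ↔ l = [] := by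
  cases l with
  | nil => simp [pvMinOpt]
  | cons x t => simp [pvMinOpt, pvMinOpt_some]

theorem pvRM_length (m : Option Int) (l : List Int) : (pvRM m l).length = l.length := by
  induction l generalizing m with
  | nil => rfl
  | cons x t ih => simp [pvRM, ih]

theorem pvRM_get (m : Option Int) (l : List Int) (i : Nat) (h : i < l.length) :
    (pvRM m l)[i]? = pvMinOpt m (l.take (i + 1)) := by
  induction l generalizing m i with
  | nil => simp at h
  | cons x t ih =>
    cases i with
    | zero => cases m <;> simp [pvRM, pvMinOpt]
    | succ i =>
      have h' : i < t.length := by simpa using h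
      cases m <;> simp [pvRM, pvMinOpt] <;> exact ih _ _ h'

theorem pm_fold (l acc : List Int) (m : Int) (h : acc.getLast? = some m) :
    l.foldl pvPmStep acc = acc ++ pvRM (some m) l := by
  induction l generalizing acc m with
  | nil => simp [pvRM]
  | cons x t ih =>
    have hne : acc ≠ [] := by
      intro h0; rw [h0] at h; simp at h
    have hstep : pvPmStep acc x = acc ++ [min m x] := by
      have hlast : PySem.List.pyGetD acc (-1) 0 = m := by
        rw [PySem.List.pyGetD_neg_one (h := hne)]
        have := List.getLast?_eq_getLast (l := acc) hne
        rw [this] at h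
        exact Option.some_injective _ h
      simp [pvPmStep, hne, hlast]
    rw [List.foldl_cons, hstep,
      ih (acc ++ [min m x]) (min m x) (by simp)]
    simp [pvRM]

theorem pm_eq (a : List Int) : a.foldl pvPmStep [] = pvRM none a := by
  cases a with
  | nil => rfl
  | cons x t =>
    have h0 : pvPmStep [] x = [x] := by simp [pvPmStep]
    rw [List.foldl_cons, h0, pm_fold t [x] x (by simp)]
    simp [pvRM]

theorem sm_fold (l : List Int) (st : Option Int × List Int) :
    l.foldl pvSmStep st = (pvMinOpt st.1 l, st.2 ++ pvRM st.1 l) := by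
  induction l generalizing st with
  | nil => simp [pvRM, pvMinOpt]
  | cons x t ih =>
    obtain ⟨m0, acc⟩ := st
    rw [List.foldl_cons]
    cases m0 with
    | none =>
      show List.foldl pvSmStep (some x, acc ++ [x]) t = _
      rw [ih]; simp [pvMinOpt, pvRM]
    | some z =>
      have hm : (if x < z then x else z) = min z x := by
        simp only [min_def]; split <;> split <;> omega
      show List.foldl pvSmStep
          (some (if x < z then x else z), acc ++ [if x < z then x else z]) t = _
      rw [hm, ih]; simp [pvMinOpt, pvRM]

theorem fl_fold (l : List (Int × Int)) (d1 d2 : PySem.Dict Int Int) :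
    l.foldl pvFLStep (d1, d2) = (l.foldl pvStep1 d1, l.foldl pvStep2 d2) := by
  induction l generalizing d1 d2 with
  | nil => rfl
  | cons p t ih => simp [pvFLStep, ih]

theorem pvFirstN_append (v x : Int) (a : List Int) :
    pvFirstN v (a ++ [x]) =
      (pvFirstN v a).orElse (fun _ => if x = v then some a.length else none) := by
  induction a with
  | nil => simp [pvFirstN, Option.orElse]
  | cons y t ih =>
    by_cases hy : y = v
    · simp [pvFirstN, hy, Option.orElse]
    · simp only [List.cons_append, pvFirstN, hy, if_false, ih]
      cases hvt : pvFirstN v t with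
      | none => by_cases hxv : x = v <;> simp [Option.orElse, hxv]
      | some f => simp [Option.orElse]

theorem pvFirstN_eq_some (v : Int) (a : List Int) (f : Nat) (h : pvFirstN v a = some f) :
    f < a.length ∧ a[f]? = some v ∧ ∀ j < f, a[j]? ≠ some v := by
  induction a generalizing f with
  | nil => simp [pvFirstN] at h
  | cons y t ih =>
    by_cases hy : y = v
    · simp [pvFirstN, hy] at h
      subst h
      exact ⟨by simp, by simp [hy], by omega⟩
    · simp only [pvFirstN, hy, if_false] at h
      cases hvt : pvFirstN v t with
      | none => rw [hvt] at h; simp at h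
      | some f' =>
        rw [hvt] at h; simp at h
        obtain ⟨h1, h2, h3⟩ := ih f' hvt
        refine ⟨by simp; omega, by rw [← h]; simpa using h2, ?_⟩
        intro j hj
        cases j with
        | zero => simp [hy]
        | succ j => rw [← h] at hj; simpa using h3 j (by omega)

theorem pvFirstN_eq_none_iff (v : Int) (a : List Int) :
    pvFirstN v a = none ↔ v ∉ a := by
  induction a with
  | nil => simp [pvFirstN]
  | cons y t ih =>
    by_cases hy : y = v <;> simp [pvFirstN, hy, ih]
    tauto

theorem pvFirstN_le (v : Int) (a : List Int) (i : Nat) (hi : a[i]? = some v) :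
    ∃ f, pvFirstN v a = some f ∧ f ≤ i := by
  induction a generalizing i with
  | nil => simp at hi
  | cons y t ih =>
    by_cases hy : y = v
    · exact ⟨0, by simp [pvFirstN, hy], by omega⟩
    · cases i with
      | zero => simp at hi; exact absurd hi hy
      | succ i =>
        obtain ⟨f, hf, hfi⟩ := ih i (by simpa using hi)
        exact ⟨f + 1, by simp [pvFirstN, hy, hf], by omega⟩

theorem firstD_spec (a : List Int) :
    (∀ v, ((PySem.List.enumerate a).foldl pvStep1 PySem.Dict.empty).get? v
        = (pvFirstN v a).map (fun f => (f : Int))) ∧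
      ((PySem.List.enumerate a).foldl pvStep1 PySem.Dict.empty).keys = PySem.Set.ofList a := by
  induction a using List.reverseRecOn with
  | nil =>
    refine ⟨fun v => ?_, rfl⟩
    simp [PySem.List.enumerate, pvFirstN]
  | append_singleton a x ih =>
    obtain ⟨ihg, ihk⟩ := ih
    have henum : PySem.List.enumerate (a ++ [x]) 0
        = PySem.List.enumerate a 0 ++ [((a.length : Int), x)] := by
      rw [PySem.List.enumerate_append]
      simp [PySem.List.enumerate]
    have hofl : PySem.Set.ofList (a ++ [x]) = PySem.Set.add (PySem.Set.ofList a) x := by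
      rw [PySem.Set.ofList_eq_foldl, PySem.Set.ofList_eq_foldl, List.foldl_append]
      rfl
    rw [henum, List.foldl_append, List.foldl_cons, List.foldl_nil]
    set D := (PySem.List.enumerate a 0).foldl pvStep1 PySem.Dict.empty with hD
    have hcont : D.contains x = (pvFirstN x a).isSome := by
      rw [PySem.Dict.contains_eq_isSome_get?, ihg x]
      cases pvFirstN x a <;> rfl
    cases hx : pvFirstN x a with
    | some f =>
      have hxa : x ∈ a := by
        by_contra hxa
        rw [(pvFirstN_eq_none_iff x a).mpr hxa] at hx
        simp at hx
      have hstep : pvStep1 D ((a.length : Int), x) = D := by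
        simp [pvStep1, hcont, hx]
      rw [hstep]
      refine ⟨fun v => ?_, ?_⟩
      · rw [ihg v, pvFirstN_append]
        cases hv : pvFirstN v a with
        | some f' => simp [Option.orElse]
        | none =>
          by_cases hxv : x = v
          · subst hxv
            rw [hv] at hx
            simp at hx
          · simp [Option.orElse, hxv]
      · rw [ihk, hofl]
        have : x ∈ PySem.Set.ofList a := (PySem.Set.mem_ofList ..).mpr hxa
        simp [PySem.Set.add, PySem.Set.contains, this]
    | none =>
      have hxa : x ∉ a := (pvFirstN_eq_none_iff x a).mp hx
      have hstep : pvStep1 D ((a.length : Int), x) = D.insert x (a.length : Int) := by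
        simp [pvStep1, hcont, hx]
      rw [hstep]
      refine ⟨fun v => ?_, ?_⟩
      · rw [PySem.Dict.get?_insert, pvFirstN_append]
        by_cases hxv : v = x
        · subst hxv
          rw [hx]
          simp [Option.orElse]
        · rw [if_neg hxv, ihg v]
          cases hv : pvFirstN v a with
          | some f' => simp [Option.orElse]
          | none =>
            have : ¬ (x = v) := fun h => hxv h.symm
            simp [Option.orElse, this]
      · rw [PySem.Dict.keys_insert_of_not_contains D (a.length : Int) (by rw [hcont, hx]; rfl),
          ihk, hofl]
        have : x ∉ PySem.Set.ofList a := fun h => hxa ((PySem.Set.mem_ofList ..).mp h)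
        simp [PySem.Set.add, PySem.Set.contains, this]

theorem lastD_spec (a : List Int) (v : Int) :
    ((PySem.List.enumerate a).foldl pvStep2 PySem.Dict.empty).get? v
      = (pvFirstN v a.reverse).map (fun j => ((a.length - 1 - j : Nat) : Int)) := by
  induction a using List.reverseRecOn with
  | nil => simp [PySem.List.enumerate, pvFirstN]
  | append_singleton a x ih =>
    have henum : PySem.List.enumerate (a ++ [x]) 0
        = PySem.List.enumerate a 0 ++ [((a.length : Int), x)] := by
      rw [PySem.List.enumerate_append]
      simp [PySem.List.enumerate]
    rw [henum, List.foldl_append, List.foldl_cons, List.foldl_nil]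
    show ((((PySem.List.enumerate a 0).foldl pvStep2 PySem.Dict.empty)).insert x (a.length : Int)).get? v = _
    rw [PySem.Dict.get?_insert, List.reverse_append]
    by_cases hxv : v = x
    · subst hxv
      simp [pvFirstN, List.reverse_singleton]
    · rw [if_neg hxv, ih]
      have hx : ¬ (x = v) := fun h => hxv h.symm
      simp only [List.reverse_singleton, List.singleton_append, pvFirstN, hx, if_false]
      cases hvr : pvFirstN v a.reverse with
      | none => rfl
      | some j =>
        obtain ⟨hjlen, -, -⟩ := pvFirstN_eq_some v a.reverse j hvr
        rw [List.length_reverse] at hjlen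
        simp only [Option.map_map, Option.map]
        congr 1
        simp only [List.length_append, List.length_singleton]
        congr 1
        omega

theorem mem_pvPmins (m : Option Int) (l : List Int) (v : Int) :
    v ∈ pvPmins m l ↔
      ∃ i : Nat, l[i]? = some v ∧ pvLeOpt v m = true ∧ ∀ j < i, v ≤ l.getD j v := by
  induction l generalizing m with
  | nil => simp [pvPmins]
  | cons y t ih =>
    by_cases hy : pvLeOpt y m = true
    · rw [pvPmins, if_pos hy]
      constructor
      · intro hv
        rcases List.mem_cons.mp hv with h | h
        · subst h
          exact ⟨0, by simp, hy, by omega⟩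
        · obtain ⟨i, h1, h2, h3⟩ := (ih (some y)).mp h
          have hvy : v ≤ y := by simpa [pvLeOpt] using h2
          refine ⟨i + 1, by simpa using h1, ?_, ?_⟩
          · cases m with
            | none => rfl
            | some z =>
              simp only [pvLeOpt, decide_eq_true_eq] at hy ⊢
              omega
          · intro j hj
            cases j with
            | zero => simpa using hvy
            | succ j => simpa using h3 j (by omega)
      · rintro ⟨i, h1, h2, h3⟩
        cases i with
        | zero =>
          simp at h1; subst h1; exact List.mem_cons_self ..
        | succ i =>
          refine List.mem_cons_of_mem _ ((ih (some y)).mpr ⟨i, by simpa using h1, ?_, ?_⟩)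
          · have := h3 0 (by omega)
            simp only [List.getD_cons_zero] at this
            simpa [pvLeOpt] using this
          · intro j hj
            simpa using h3 (j + 1) (by omega)
    · rw [pvPmins, if_neg hy]
      obtain ⟨z, hz, hzy⟩ : ∃ z, m = some z ∧ z < y := by
        cases m with
        | none => simp [pvLeOpt] at hy
        | some z => exact ⟨z, rfl, by simpa [pvLeOpt] using hy⟩
      rw [ih m]
      constructor
      · rintro ⟨i, h1, h2, h3⟩
        refine ⟨i + 1, by simpa using h1, h2, ?_⟩
        intro j hj
        cases j with
        | zero =>
          have hvz : v ≤ z := by rw [hz] at h2; simpa [pvLeOpt] using h2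
          simpa using le_of_lt (lt_of_le_of_lt hvz hzy)
        | succ j => simpa using h3 j (by omega)
      · rintro ⟨i, h1, h2, h3⟩
        cases i with
        | zero =>
          simp at h1; subst h1
          exact absurd h2 hy
        | succ i =>
          exact ⟨i, by simpa using h1, h2, fun j hj => by
            simpa using h3 (j + 1) (by omega)⟩

theorem keyP (a : List Int) (v : Int) (f : Nat) (hf : pvFirstN v a = some f) :
    (v ∈ pvPmins none a ↔ pvMinOpt none (a.take (f + 1)) = some v) := by
  obtain ⟨hflen, hfv, hfirst⟩ := pvFirstN_eq_some v a f hf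
  obtain ⟨hflen', hfval⟩ := List.getElem?_eq_some_iff.mp hfv
  constructor
  · intro hmem
    obtain ⟨i, h1, h2, h3⟩ := (mem_pvPmins none a v).mp hmem
    obtain ⟨f', hf', hfi⟩ := pvFirstN_le v a i h1
    rw [hf] at hf'
    injection hf' with hff
    subst hff
    rw [pvMinOpt_eq_some_iff]
    refine ⟨List.mem_iff_getElem.mpr
      ⟨f, by rw [List.length_take]; omega, by rw [List.getElem_take]; exact hfval⟩, ?_⟩
    intro y hy
    obtain ⟨j, hjlen, hjy⟩ := List.mem_iff_getElem.mp hy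
    rw [List.length_take] at hjlen
    rw [List.getElem_take] at hjy
    by_cases hjf' : j = f
    · subst hjf'
      rw [hfval] at hjy
      exact le_of_eq hjy
    · have h4 := h3 j (by omega)
      have h5 : a.getD j v = y := by
        rw [List.getD_eq_getElem?_getD, List.getElem?_eq_getElem (by omega : j < a.length)]
        simpa using hjy
      rw [h5] at h4
      exact h4
  · intro hmin
    obtain ⟨hmem2, hall⟩ := (pvMinOpt_eq_some_iff _ _).mp hmin
    refine (mem_pvPmins none a v).mpr ⟨f, hfv, rfl, ?_⟩
    intro j hj
    have hjlen : j < a.length := by omega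
    have hmemj : a[j] ∈ a.take (f + 1) :=
      List.mem_iff_getElem.mpr ⟨j, by rw [List.length_take]; omega, by rw [List.getElem_take]⟩
    have h6 := hall _ hmemj
    rw [List.getD_eq_getElem?_getD, List.getElem?_eq_getElem hjlen]
    simpa using h6

theorem mem_of_mem_pvPmins (m : Option Int) (l : List Int) (v : Int)
    (h : v ∈ pvPmins m l) : v ∈ l := by
  induction l generalizing m with
  | nil => simp [pvPmins] at h
  | cons y t ih =>
    rw [pvPmins] at h
    split at h
    · rcases List.mem_cons.mp h with h | h
      · subst h; exact List.mem_cons_self ..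
      · exact List.mem_cons_of_mem _ (ih _ h)
    · exact List.mem_cons_of_mem _ (ih _ h)

theorem count_fold (pm sm : List Int) (L : PySem.Dict Int Int)
    (l : List (Int × Int)) (acc : Int) :
    l.foldl (fun acc vf =>
        if vf.1 = PySem.List.pyGetD pm vf.2 0 ∨
           vf.1 = PySem.List.pyGetD sm (L.getD vf.1 0) 0
        then acc + 1 else acc) acc
      = acc + (l.countP (fun vf =>
          decide (vf.1 = PySem.List.pyGetD pm vf.2 0 ∨
            vf.1 = PySem.List.pyGetD sm (L.getD vf.1 0) 0)) : Int) := by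
  induction l generalizing acc with
  | nil => simp
  | cons p t ih =>
    rw [List.foldl_cons, List.countP_cons, ih]
    by_cases hp : (p.1 = PySem.List.pyGetD pm p.2 0 ∨
        p.1 = PySem.List.pyGetD sm (L.getD p.1 0) 0) <;>
      simp [hp] <;> push_cast <;> ring

-- ===== A-side lemmas (heap loop invariant), as in the A port proof =====
theorem pvPmins_snoc (m : Option Int) (l : List Int) (x : Int) :
    pvPmins m (l ++ [x]) =
      pvPmins m l ++ (if pvLeOpt x (pvMinOpt m l) then [x] else []) := by
  induction l generalizing m with
  | nil => cases m <;> simp [pvPmins, pvMinOpt, pvLeOpt]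
  | cons y t ih =>
    cases m with
    | none => simp [pvPmins, pvLeOpt, pvMinOpt, ih]
    | some z =>
      by_cases h : y ≤ z
      · simp [pvPmins, pvLeOpt, h, pvMinOpt, ih]
      · have : min z y = z := min_eq_left (le_of_not_ge h)
        simp [pvPmins, pvLeOpt, h, pvMinOpt, this, ih]

theorem pvPeek_snoc (l : List Int) (x : Int) :
    (pvHeapPeek (pvHeapPush l x) ≥ x) ↔ pvLeOpt x (pvMinOpt none l) = true := by
  cases l with
  | nil => simp [pvHeapPush, pvHeapPeek, pvLeOpt, pvMinOpt]
  | cons y t =>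
    have hf : (t ++ [x]).foldl min y = min (t.foldl min y) x := by
      simp [List.foldl_append]
    simp [pvHeapPush, pvHeapPeek, hf, pvMinOpt, pvMinOpt_some, pvLeOpt]

def pvIf (S : PySem.Set Int) (h : List Int) (x : Int) : PySem.Set Int :=
  if pvHeapPeek (pvHeapPush h x) ≥ x then PySem.Set.add S x else S

theorem pvIf_nodup (S : PySem.Set Int) (h : List Int) (x : Int) (hS : S.Nodup) :
    (pvIf S h x).Nodup := by
  unfold pvIf; split
  · exact PySem.Set.nodup_add S x hS
  · exact hS

theorem pvIf_mem (S : PySem.Set Int) (h : List Int) (x y : Int) :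
    y ∈ pvIf S h x ↔ y ∈ S ∨ (pvLeOpt x (pvMinOpt none h) = true ∧ y = x) := by
  unfold pvIf
  rw [← pvPeek_snoc h x]
  split <;> rename_i hc <;> simp [PySem.Set.mem_add, hc]

theorem pvA_inv (a : List Int) (k : Nat) (hk : k ≤ a.length) :
    ∃ S : PySem.Set Int,
      (PySem.List.pyRange 0 (k : Int) 1).foldl (pvAStep a) (PySem.Set.empty, ([], [])) =
        (S, (a.take k, a.reverse.take k)) ∧
      S.Nodup ∧
      (∀ x, x ∈ S ↔ x ∈ pvPmins none (a.take k) ∨ x ∈ pvPmins none (a.reverse.take k)) := by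
  induction k with
  | zero => exact ⟨PySem.Set.empty, by simp, List.nodup_nil, by simp [pvPmins, PySem.Set.empty]⟩
  | succ k ih =>
    obtain ⟨S, hfold, hnd, hmem⟩ := ih (Nat.le_of_succ_le hk)
    have hklt : k < a.length := hk
    have hkr : k < a.reverse.length := by simpa using hklt
    have hrange : PySem.List.pyRange 0 ((k+1 : Nat) : Int) 1 =
        PySem.List.pyRange 0 (k : Int) 1 ++ [(k : Int)] := by
      have := PySem.List.pyRange_one_succ_right (a := 0) (b := (k : Int)) (by positivity)
      push_cast
      push_cast at this
      exact this
    have hlb : PySem.List.pyGetD a ((k : Nat) : Int) 0 = a[k] := by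
      simp [List.getD_eq_getElem?_getD, List.getElem?_eq_getElem hklt]
    have hrb : PySem.List.pyGetD a (-1 - (k : Int)) 0 = a.reverse[k] := by
      have h1 : (-1 - (k : Int)) = -(((k+1 : Nat) : Int)) := by push_cast; ring
      rw [h1, PySem.List.pyGetD_neg_natCast a (k+1) 0 (by omega) (by omega)]
      rw [List.getElem_reverse]
      congr 1
      omega
    have htake : a.take (k+1) = a.take k ++ [a[k]] := by
      rw [List.take_add_one, List.getElem?_eq_getElem hklt]; rfl
    have htaker : a.reverse.take (k+1) = a.reverse.take k ++ [a.reverse[k]] := by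
      rw [List.take_add_one, List.getElem?_eq_getElem hkr]; rfl
    rw [hrange, List.foldl_append, hfold, List.foldl_cons, List.foldl_nil]
    have hstep : pvAStep a (S, (a.take k, a.reverse.take k)) ((k : Nat) : Int) =
        (pvIf (pvIf S (a.take k) a[k]) (a.reverse.take k) a.reverse[k],
          (a.take (k+1), a.reverse.take (k+1))) := by
      simp only [pvAStep, hlb, hrb, pvIf, htake, htaker, pvHeapPush]
      rfl
    rw [hstep]
    refine ⟨_, rfl, pvIf_nodup _ _ _ (pvIf_nodup _ _ _ hnd), fun x => ?_⟩
    rw [pvIf_mem, pvIf_mem, hmem, htake, htaker, pvPmins_snoc, pvPmins_snoc]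
    by_cases h1 : pvLeOpt a[k] (pvMinOpt none (a.take k)) = true <;>
      by_cases h2 : pvLeOpt (a.reverse[k]) (pvMinOpt none (a.reverse.take k)) = true <;>
        simp [h1, h2] <;> tauto

-- ===== VERDICT =====
theorem sm_snd (a : List Int) :
    (a.reverse.foldl pvSmStep (none, [])).2 = pvRM none a.reverse := by
  rw [sm_fold]
  simp

theorem fl_fst (a : List Int) :
    ((PySem.List.enumerate a).foldl pvFLStep (PySem.Dict.empty, PySem.Dict.empty)).1
      = (PySem.List.enumerate a).foldl pvStep1 PySem.Dict.empty := by
  rw [fl_fold]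

theorem fl_snd (a : List Int) :
    ((PySem.List.enumerate a).foldl pvFLStep (PySem.Dict.empty, PySem.Dict.empty)).2
      = (PySem.List.enumerate a).foldl pvStep2 PySem.Dict.empty := by
  rw [fl_fold]

theorem dict_getD_eq (d : PySem.Dict Int Int) (k dflt : Int) :
    d.getD k dflt = (d.get? k).getD dflt := by
  simp [PySem.Dict.getD, PySem.Dict.get?]

theorem solution_spec : Claim_equal_solution := by
  intro a _
  unfold Spec_solution solution
  obtain ⟨S, hfold, hnd, hmem⟩ := pvA_inv a a.length le_rfl
  have hlenA : PySem.List.len a = ((a.length : Nat) : Int) := by simp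
  rw [hlenA, hfold]
  rw [List.take_length, show a.length = a.reverse.length by simp, List.take_length] at hmem
  have halt : solution_alt a =
      List.foldl (fun acc vf =>
        if vf.1 = PySem.List.pyGetD (a.foldl pvPmStep []) vf.2 0 ∨
           vf.1 = PySem.List.pyGetD ((a.reverse.foldl pvSmStep (none, [])).2).reverse
             (((PySem.List.enumerate a).foldl pvFLStep
                (PySem.Dict.empty, PySem.Dict.empty)).2.getD vf.1 0) 0
        then acc + 1 else acc) 0
        (((PySem.List.enumerate a).foldl pvFLStep
          (PySem.Dict.empty, PySem.Dict.empty)).1.items) := rfl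
  rw [pm_eq a, sm_snd a, fl_fst a, fl_snd a] at halt
  rw [halt]
  set F := (PySem.List.enumerate a).foldl pvStep1 PySem.Dict.empty with hFdef
  set L := (PySem.List.enumerate a).foldl pvStep2 PySem.Dict.empty with hLdef
  obtain ⟨hFg, hFk⟩ := firstD_spec a
  have hknd : F.keys.Nodup := by rw [← hFdef] at hFk; rw [hFk]; exact PySem.Set.nodup_ofList a
  rw [← hFdef] at hFg hFk
  have hLg : ∀ v, L.get? v = (pvFirstN v a.reverse).map (fun j => ((a.length - 1 - j : Nat) : Int)) :=
    fun v => lastD_spec a v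
  -- the per-value predicate
  have key : ∀ v, v ∈ a →
      ((v = PySem.List.pyGetD (pvRM none a) (F.getD v 0) 0 ∨
        v = PySem.List.pyGetD (pvRM none a.reverse).reverse (L.getD v 0) 0) ↔
       (v ∈ pvPmins none a ∨ v ∈ pvPmins none a.reverse)) := by
    intro v hva
    have hlen0 : 0 < a.length := List.length_pos_of_mem hva
    obtain ⟨f, hf⟩ : ∃ f, pvFirstN v a = some f := by
      cases hx : pvFirstN v a with
      | none => exact absurd ((pvFirstN_eq_none_iff v a).mp hx) (not_not_intro hva)
      | some f => exact ⟨f, rfl⟩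
    obtain ⟨j, hj⟩ : ∃ j, pvFirstN v a.reverse = some j := by
      cases hx : pvFirstN v a.reverse with
      | none =>
        exact absurd ((pvFirstN_eq_none_iff v a.reverse).mp hx) (not_not_intro (List.mem_reverse.mpr hva))
      | some j => exact ⟨j, rfl⟩
    obtain ⟨hflen, -, -⟩ := pvFirstN_eq_some v a f hf
    obtain ⟨hjlen, -, -⟩ := pvFirstN_eq_some v a.reverse j hj
    rw [List.length_reverse] at hjlen
    have hFv : F.getD v 0 = (f : Int) := by rw [dict_getD_eq, hFg v, hf]; rfl
    have hLv : L.getD v 0 = ((a.length - 1 - j : Nat) : Int) := by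
      rw [dict_getD_eq, hLg v, hj]; rfl
    have hflen' : f < (a.take (f + 1)).length ⊔ a.length := by
      rw [List.length_take]; omega
    have hpm_iff : (v = PySem.List.pyGetD (pvRM none a) (F.getD v 0) 0)
        ↔ pvMinOpt none (a.take (f + 1)) = some v := by
      have hg := pvRM_get none a f hflen
      rw [hFv, PySem.List.pyGetD_natCast, List.getD_eq_getElem?_getD, hg]
      cases hmo : pvMinOpt none (a.take (f + 1)) with
      | none =>
        rw [pvMinOpt_none_eq_none] at hmo
        have hlt : (a.take (f + 1)).length = min (f + 1) a.length := List.length_take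
        rw [hmo] at hlt
        simp at hlt
        omega
      | some w => simp [eq_comm]
    have hsm_iff : (v = PySem.List.pyGetD (pvRM none a.reverse).reverse (L.getD v 0) 0)
        ↔ pvMinOpt none (a.reverse.take (j + 1)) = some v := by
      have hrmlen : (pvRM none a.reverse).length = a.length := by
        rw [pvRM_length, List.length_reverse]
      have hjlen' : j < a.reverse.length := by rw [List.length_reverse]; omega
      have hg := pvRM_get none a.reverse j hjlen'
      have h1 : a.length - 1 - j < (pvRM none a.reverse).length := by rw [hrmlen]; omega
      have hrev : (pvRM none a.reverse).reverse[(a.length - 1 - j)]?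
          = (pvRM none a.reverse)[j]? := by
        rw [List.getElem?_reverse h1, hrmlen,
          show a.length - 1 - (a.length - 1 - j) = j by omega]
      rw [hLv, PySem.List.pyGetD_natCast, List.getD_eq_getElem?_getD, hrev, hg]
      cases hmo : pvMinOpt none (a.reverse.take (j + 1)) with
      | none =>
        rw [pvMinOpt_none_eq_none] at hmo
        have hlt : (a.reverse.take (j + 1)).length = min (j + 1) a.reverse.length :=
          List.length_take
        rw [hmo, List.length_reverse] at hlt
        simp at hlt
        omega
      | some w => simp [eq_comm]
    rw [hpm_iff, hsm_iff, keyP a v f hf, keyP a.reverse v j hj]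
  -- count the items
  have hitems : F.items = F.keys.map (fun k => (k, F.getD k 0)) :=
    PySem.Dict.items_eq_map_keys F hknd 0
  rw [hitems, count_fold (pvRM none a) (pvRM none a.reverse).reverse L _ 0,
    List.countP_map, hFk]
  have hfilter : ((PySem.Set.ofList a).filter
      (fun v => decide (v = PySem.List.pyGetD (pvRM none a) (F.getD v 0) 0 ∨
        v = PySem.List.pyGetD (pvRM none a.reverse).reverse (L.getD v 0) 0))).Perm S := by
    rw [List.perm_ext_iff_of_nodup (List.Nodup.filter _ (PySem.Set.nodup_ofList a)) hnd]
    intro v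
    rw [List.mem_filter, hmem v, PySem.Set.mem_ofList]
    constructor
    · rintro ⟨hva, hq⟩
      exact (key v hva).mp (by simpa using hq)
    · intro h
      have hva : v ∈ a := by
        rcases h with h | h
        · exact mem_of_mem_pvPmins none a v h
        · exact List.mem_reverse.mp (mem_of_mem_pvPmins none a.reverse v h)
      exact ⟨hva, by simpa using (key v hva).mpr h⟩
  rw [List.countP_eq_length_filter]
  rw [show ((fun vf : Int × Int => decide (vf.1 = PySem.List.pyGetD (pvRM none a) vf.2 0 ∨
      vf.1 = PySem.List.pyGetD (pvRM none a.reverse).reverse (L.getD vf.1 0) 0)) ∘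
      (fun k => (k, F.getD k 0)))
    = (fun v => decide (v = PySem.List.pyGetD (pvRM none a) (F.getD v 0) 0 ∨
        v = PySem.List.pyGetD (pvRM none a.reverse).reverse (L.getD v 0) 0)) from rfl]
  rw [hfilter.length_eq]
  simp [PySem.Set.len]
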